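-- pv_equiv track=rewrite | github.com/Diya-Sajan/100-days-of-code | Medium/Two Repeated Elements/two-repeated-elements.py | twoRepeated
-- ===== SOURCE A (Python) =====
-- def twoRepeated(arr , n):
--     f = {}
--     res = []
--     for i in arr:
--         if i not in f:
--             f[i] = 1
--         else:
--             f[i] +=1
--             res.append(i)
--
--     return res
-- ===== SOURCE B (Python) =====
-- def twoRepeated(arr, n):
--     first = {}
--     for idx, v in enumerate(arr):
--         if v not in first:
--             first[v] = idx
--     return [v for idx, v in enumerate(arr) if first[v] != idx]
-- ===== Notes on version B (the rewrite author's own statement) =====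
-- stated objective: alternative
-- what changed: Replaces the single membership-growing count-dict scan (decide-and-append inline) by two passes: precompute a first-occurrence index table, then filter positions whose index is not the first occurrence.
import Mathlib
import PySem

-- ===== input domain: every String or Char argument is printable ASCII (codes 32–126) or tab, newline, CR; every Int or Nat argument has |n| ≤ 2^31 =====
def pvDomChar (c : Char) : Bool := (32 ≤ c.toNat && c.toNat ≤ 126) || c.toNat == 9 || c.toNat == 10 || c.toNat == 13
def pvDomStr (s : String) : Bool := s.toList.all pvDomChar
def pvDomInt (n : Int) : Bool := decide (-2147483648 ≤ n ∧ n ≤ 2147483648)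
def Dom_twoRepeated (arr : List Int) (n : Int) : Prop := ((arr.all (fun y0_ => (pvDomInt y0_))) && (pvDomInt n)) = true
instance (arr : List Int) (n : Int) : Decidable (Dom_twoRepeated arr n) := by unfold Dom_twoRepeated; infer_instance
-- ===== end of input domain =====

-- B replaces A's single count-dict scan by a first-occurrence index table plus a position filter (alternative decomposition, same cost).

-- ===== PORT A =====
def twoRepeated (arr : List Int) (n : Int) : List Int :=
  (arr.foldl (fun (st : PySem.Dict Int Int × List Int) i =>
      if st.1.contains i = false then (st.1.insert i 1, st.2)
      else (st.1.modify i 0 (· + 1), st.2 ++ [i]))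
    (PySem.Dict.empty, [])).2

-- ===== PORT B =====
-- `first[v]` in Source B is ported as getD (default 0): every v in arr is a key of `first`, so the default is never used.
def twoRepeated_alt (arr : List Int) (n : Int) : List Int :=
  let first := (PySem.List.enumerate arr).foldl
      (fun (d : PySem.Dict Int Int) p => if d.contains p.2 = false then d.insert p.2 p.1 else d)
      PySem.Dict.empty
  ((PySem.List.enumerate arr).filter (fun p => decide (first.getD p.2 0 ≠ p.1))).map (·.2)

-- ===== PRECONDITION & SPEC =====
def Spec_twoRepeated (arr : List Int) (n : Int) (out : List Int) : Prop := out = twoRepeated_alt arr n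
instance (arr : List Int) (n : Int) (out : List Int) : Decidable (Spec_twoRepeated arr n out) := by unfold Spec_twoRepeated; infer_instance

-- ===== CLAIM (what is proved, stated in full; the proofs are below) =====
def Claim_equal_twoRepeated : Prop := ∀ (arr : List Int) (n : Int), Dom_twoRepeated arr n → Spec_twoRepeated arr n (twoRepeated arr n)

-- ===== LEMMAS AND PROOFS =====

-- A's loop step / B's first-pass step, named for the proofs
def stepA (st : PySem.Dict Int Int × List Int) (i : Int) : PySem.Dict Int Int × List Int :=
  if st.1.contains i = false then (st.1.insert i 1, st.2)
  else (st.1.modify i 0 (· + 1), st.2 ++ [i])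

def stepF (d : PySem.Dict Int Int) (p : Int × Int) : PySem.Dict Int Int :=
  if d.contains p.2 = false then d.insert p.2 p.1 else d

theorem stepA_eq (arr : List Int) (n : Int) :
    twoRepeated arr n = (arr.foldl stepA (PySem.Dict.empty, [])).2 := rfl

theorem stepF_eq (arr : List Int) (n : Int) :
    twoRepeated_alt arr n =
      (((PySem.List.enumerate arr).filter
          (fun p => decide ((((PySem.List.enumerate arr).foldl stepF PySem.Dict.empty).getD p.2 0 : Int) ≠ p.1))).map (·.2)) := rfl

-- invariant of A's dict: its key set is the set of scanned elements
theorem containsA (l : List Int) (d : PySem.Dict Int Int) (res : List Int) (v : Int) :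
    ((l.foldl stepA (d, res)).1).contains v = (d.contains v || decide (v ∈ l)) := by
  induction l generalizing d res with
  | nil => simp
  | cons x t ih =>
    simp only [List.foldl_cons, stepA]
    by_cases h : d.contains x = false
    · simp only [h, if_true]
      rw [ih, PySem.Dict.contains_insert]
      by_cases hv : v = x
      · subst hv; simp
      · have hb : (v == x) = false := beq_eq_false_iff_ne.mpr hv
        have hm : decide (v ∈ x :: t) = decide (v ∈ t) := decide_eq_decide.mpr (by simp [hv])
        rw [hb, hm]; simp
    · have h' : d.contains x = true := by simpa using h
      rw [h']
      simp only [Bool.true_eq_false, if_false]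
      rw [ih, PySem.Dict.contains_modify]
      by_cases hv : v = x
      · subst hv; simp [h']
      · have hb : (v == x) = false := beq_eq_false_iff_ne.mpr hv
        have hm : decide (v ∈ x :: t) = decide (v ∈ t) := decide_eq_decide.mpr (by simp [hv])
        rw [hb, hm]; simp

theorem A_concat (xs : List Int) (x : Int) (n : Int) :
    twoRepeated (xs ++ [x]) n = twoRepeated xs n ++ (if x ∈ xs then [x] else []) := by
  rw [stepA_eq, stepA_eq, List.foldl_append]
  simp only [List.foldl_cons, List.foldl_nil]
  rw [show (xs.foldl stepA (PySem.Dict.empty, [])) =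
      ((xs.foldl stepA (PySem.Dict.empty, [])).1, (xs.foldl stepA (PySem.Dict.empty, [])).2) from rfl]
  simp only [stepA, containsA, PySem.Dict.contains_empty, Bool.false_or]
  by_cases h : x ∈ xs <;> simp [h]

-- B's first-pass dict: key set = scanned values; lookups at old keys survive later steps
theorem containsF (l : List (Int × Int)) (d : PySem.Dict Int Int) (v : Int) :
    (l.foldl stepF d).contains v = (d.contains v || decide (v ∈ l.map (·.2))) := by
  induction l generalizing d with
  | nil => simp
  | cons p t ih =>
    simp only [List.foldl_cons, stepF]
    by_cases h : d.contains p.2 = false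
    · simp only [h, if_true]
      rw [ih, PySem.Dict.contains_insert]
      by_cases hv : v = p.2
      · subst hv; simp
      · have hb : (v == p.2) = false := beq_eq_false_iff_ne.mpr hv
        have hm : decide (v ∈ List.map (fun x => x.2) (p :: t)) = decide (v ∈ List.map (fun x => x.2) t) :=
          decide_eq_decide.mpr (by simp [hv])
        rw [hb, hm]; simp
    · have h' : d.contains p.2 = true := by simpa using h
      rw [h']
      simp only [Bool.true_eq_false, if_false]
      rw [ih]
      by_cases hv : v = p.2
      · subst hv; simp [h']
      · have hm : decide (v ∈ List.map (fun x => x.2) (p :: t)) = decide (v ∈ List.map (fun x => x.2) t) :=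
          decide_eq_decide.mpr (by simp [hv])
        rw [hm]

theorem getDF_bound (l : List (Int × Int)) (d : PySem.Dict Int Int) (v : Int) (N : Int)
    (hl : ∀ p ∈ l, p.1 < N) (hd : d.contains v = true → d.getD v 0 < N)
    (h : (l.foldl stepF d).contains v = true) : (l.foldl stepF d).getD v 0 < N := by
  induction l generalizing d with
  | nil => exact hd h
  | cons p t ih =>
    simp only [List.foldl_cons, stepF] at h ⊢
    by_cases hc : d.contains p.2 = false
    · simp only [hc, if_true] at h ⊢
      refine ih _ (fun q hq => hl q (List.mem_cons_of_mem _ hq)) ?_ h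
      intro hcv
      by_cases hv : v = p.2
      · subst hv; rw [PySem.Dict.getD_insert_self]; exact hl p (List.mem_cons_self)
      · rw [PySem.Dict.getD_insert_of_ne _ _ _ hv]
        exact hd (by simpa [PySem.Dict.contains_insert, hv] using hcv)
    · simp only [hc] at h ⊢
      exact ih _ (fun q hq => hl q (List.mem_cons_of_mem _ hq)) hd h

theorem mem_snd_enumerate (xs : List Int) (p : Int × Int) (h : p ∈ PySem.List.enumerate xs) :
    p.2 ∈ xs := by
  have := PySem.List.map_snd_enumerate xs 0
  rw [← this]
  exact List.mem_map_of_mem h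

theorem B_concat (xs : List Int) (x : Int) (n : Int) :
    twoRepeated_alt (xs ++ [x]) n = twoRepeated_alt xs n ++ (if x ∈ xs then [x] else []) := by
  rw [stepF_eq, stepF_eq]
  have henum : PySem.List.enumerate (xs ++ [x]) =
      PySem.List.enumerate xs ++ [((xs.length : Int), x)] := by
    rw [PySem.List.enumerate_append]
    simp [PySem.List.enumerate_cons, PySem.List.enumerate_nil]
  rw [henum]
  set F := (PySem.List.enumerate xs).foldl stepF PySem.Dict.empty with hF
  have hcontF : ∀ v, F.contains v = decide (v ∈ xs) := by
    intro v
    rw [hF, containsF]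
    simp [PySem.List.map_snd_enumerate]
  have hF' : (PySem.List.enumerate xs ++ [((xs.length : Int), x)]).foldl stepF PySem.Dict.empty
      = stepF F ((xs.length : Int), x) := by
    rw [List.foldl_append]; rfl
  rw [hF']
  -- lookups at positions of xs are unchanged by the last step
  have hsame : ∀ p ∈ PySem.List.enumerate xs,
      (stepF F ((xs.length : Int), x)).getD p.2 0 = F.getD p.2 0 := by
    intro p hp
    simp only [stepF]
    by_cases hc : F.contains x = false
    · simp only [hc, if_true]
      have hne : p.2 ≠ x := by
        intro e
        have := hcontF x
        rw [hc] at this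
        have hx : x ∉ xs := by simpa using this.symm
        exact hx (e ▸ mem_snd_enumerate xs p hp)
      rw [PySem.Dict.getD_insert_of_ne _ _ _ hne]
    · have h' : F.contains x = true := by simpa using hc
      simp [h']
  rw [List.filter_append, List.map_append]
  congr 1
  · congr 1
    apply List.filter_congr
    intro p hp
    simp [hsame p hp]
  · -- the new last pair is kept iff x already occurs in xs
    by_cases hx : x ∈ xs
    · have hcx : F.contains x = true := by rw [hcontF]; simpa using hx
      have hlt : F.getD x 0 < (xs.length : Int) := by
        rw [hF]
        refine getDF_bound _ _ _ _ ?_ (by simp) (by rw [← hF, hcx])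
        intro p hp
        rcases (PySem.List.mem_enumerate_iff _ _ _).mp hp with ⟨k, hk, rfl⟩
        simpa using (by exact_mod_cast hk : (k : Int) < (xs.length : Int))
      simp only [stepF, hcx]
      simp [hx, ne_of_lt hlt]
    · have hcx : F.contains x = false := by rw [hcontF]; simpa using hx
      simp only [stepF, hcx, if_true]
      simp [hx, PySem.Dict.getD_insert_self]

-- ===== VERDICT (by name: the statement is the Claim_ definition above) =====
theorem AB_eq (arr : List Int) (n : Int) : twoRepeated arr n = twoRepeated_alt arr n := by
  induction arr using List.reverseRecOn with
  | nil => rfl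
  | append_singleton xs x ih =>
    rw [A_concat, B_concat, ih]

theorem twoRepeated_spec : Claim_equal_twoRepeated := by
  intro arr n _
  exact AB_eq arr n
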